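-- pv_equiv track=rewrite | github.com/Walid-Berrouk/AlphaCTF2k23_Write-Ups | cryptography/Ez_Crypto/decrypt.py | flag_back
-- ===== SOURCE A (Python) =====
-- def flag_back(enc, chars) :
--     chars_forbidden = '&~#[]|`\^@$£%!?;:,.§<>=+/)(éèçà'
--
--     flag_stars = ""
--     for i in chars :
--         if i in chars_forbidden :
--             continue
--
--         flag_stars += i
--
--     # Get flag back
--
--     cpt = 0
--     flag = ""
--     for i in flag_stars :
--         if i == "*" :
--             flag += enc[cpt]
--             cpt += 1
--         else :
--             flag += i
--
--     return flag
-- ===== SOURCE B (Python) =====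
-- def flag_back(enc, chars):
--     forbidden = '&~#[]|`\^@$£%!?;:,.§<>=+/)(éèçà'
--     parts = ''.join(c for c in chars if c not in forbidden).split('*')
--     pieces = [parts[0]]
--     for i in range(1, len(parts)):
--         pieces.append(enc[i - 1])
--         pieces.append(parts[i])
--     return ''.join(pieces)
-- ===== Notes on version B (the rewrite author's own statement) =====
-- stated objective: alternative
-- what changed: Instead of A's build-filtered-string-then-rescan-per-character loop, B filters with a comprehension, splits the filtered string on '*', and interleaves the resulting segments with successive characters of enc.
import Mathlib
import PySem

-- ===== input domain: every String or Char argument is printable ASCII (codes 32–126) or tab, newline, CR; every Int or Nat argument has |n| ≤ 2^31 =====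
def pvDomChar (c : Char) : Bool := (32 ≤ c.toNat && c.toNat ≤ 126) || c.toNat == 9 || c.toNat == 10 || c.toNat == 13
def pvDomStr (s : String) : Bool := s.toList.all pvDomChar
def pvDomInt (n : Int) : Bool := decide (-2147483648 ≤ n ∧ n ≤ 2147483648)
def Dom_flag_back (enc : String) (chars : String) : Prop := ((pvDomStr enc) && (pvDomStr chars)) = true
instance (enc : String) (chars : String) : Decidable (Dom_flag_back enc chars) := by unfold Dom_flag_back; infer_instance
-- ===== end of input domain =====

-- B replaces A's per-character rescan with a split-on-'*'-and-interleave-with-enc decomposition;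
-- return values agree wherever A returns (objective: alternative).

-- ===== PORT A =====
-- the forbidden characters string of A ('\^' in the Python literal is backslash then caret)
def pvForbidden : List Char := "&~#[]|`\\^@$£%!?;:,.§<>=+/)(éèçà".toList

-- second loop body of A; `none` threads Python's IndexError from enc[cpt] (cpt only ever ≥ 0)
def pvStepA (enc : List Char) (st : Option (Nat × List Char)) (i : Char) : Option (Nat × List Char) :=
  match st with
  | none => none
  | some (cpt, flag) =>
    if i = '*' then
      match enc[cpt]? with
      | some c => some (cpt + 1, flag ++ [c])
      | none => none
    else some (cpt, flag ++ [i])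

def flag_back (enc : String) (chars : String) : String :=
  -- first loop: flag_stars += i unless i in chars_forbidden ('i in str' on a single char = membership)
  let flag_stars : List Char :=
    chars.toList.foldl (fun acc i => if pvForbidden.contains i then acc else acc ++ [i]) []
  -- second loop over flag_stars
  match flag_stars.foldl (pvStepA enc.toList) (some (0, [])) with
  | some (_, flag) => String.ofList flag
  | none => ""   -- unreachable under Pre_flag_back (Python raises IndexError here)

-- ===== PORT B =====
-- hand port of str.split('*'): returns (segment before the first '*', the remaining segments);
-- exact: Python's split yields at least one segment, here the first component
def pvSplitStars : List Char → List Char × List (List Char)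
  | [] => ([], [])
  | c :: cs =>
    let (p, ps) := pvSplitStars cs
    if c = '*' then ([], p :: ps) else (c :: p, ps)

-- B's loop over parts[1:]: between consecutive segments insert enc[i]; `none` = Python IndexError
def pvInterleave (enc : List Char) : Nat → List (List Char) → Option (List Char)
  | _, [] => some []
  | i, p :: ps =>
    match enc[i]? with
    | none => none
    | some e => (pvInterleave enc (i + 1) ps).map (fun r => e :: (p ++ r))

def flag_back_alt (enc : String) (chars : String) : String :=
  let filtered := chars.toList.filter (fun c => !pvForbidden.contains c)
  let (p0, rest) := pvSplitStars filtered
  match pvInterleave enc.toList 0 rest with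
  | some r => String.ofList (p0 ++ r)
  | none => ""   -- unreachable under Pre_flag_back (Python raises IndexError here)

-- ===== PRECONDITION & SPEC =====
-- Pre_ excludes exactly the inputs where Python A raises IndexError: more '*' to substitute
-- than characters in enc ('*' is never forbidden, so the stars surviving the filter are all of them).
def Pre_flag_back (enc : String) (chars : String) : Prop :=
  chars.toList.count '*' ≤ enc.toList.length
instance (enc : String) (chars : String) : Decidable (Pre_flag_back enc chars) := by
  unfold Pre_flag_back; infer_instance

def pvWitness_flag_back : String × String := ("AB", "x*!y*?")

def Spec_flag_back (enc : String) (chars : String) (out : String) : Prop := out = flag_back_alt enc chars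
instance (enc : String) (chars : String) (out : String) : Decidable (Spec_flag_back enc chars out) := by unfold Spec_flag_back; infer_instance

-- ===== CLAIM (what is proved, stated in full; the proofs are below) =====
def Claim_equal_flag_back : Prop := ∀ (enc : String) (chars : String), Dom_flag_back enc chars → Pre_flag_back enc chars → Spec_flag_back enc chars (flag_back enc chars)

-- ===== LEMMAS AND PROOFS =====

-- A's first loop is a filter
theorem pvFilter_loop (l : List Char) (acc : List Char) :
    l.foldl (fun acc i => if pvForbidden.contains i then acc else acc ++ [i]) acc
      = acc ++ l.filter (fun i => !pvForbidden.contains i) := by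
  induction l generalizing acc with
  | nil => simp
  | cons x xs ih =>
    rw [List.foldl_cons, ih, List.filter_cons]
    by_cases h : x ∈ pvForbidden <;> simp [h]

-- A's second loop computed via B's split-and-interleave decomposition
theorem pvStepA_none (enc : List Char) (l : List Char) :
    l.foldl (pvStepA enc) none = none := by
  induction l with
  | nil => rfl
  | cons x xs ih => simpa [pvStepA] using ih

theorem pvSplitFold (enc : List Char) (l : List Char) (cpt : Nat) (flag : List Char) :
    l.foldl (pvStepA enc) (some (cpt, flag)) =
      (pvInterleave enc cpt (pvSplitStars l).2).map
        (fun r => (cpt + (pvSplitStars l).2.length, flag ++ (pvSplitStars l).1 ++ r)) := by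
  induction l generalizing cpt flag with
  | nil => simp [pvSplitStars, pvInterleave]
  | cons c cs ih =>
    by_cases hs : c = '*'
    · subst hs
      cases he : enc[cpt]? with
      | none =>
        simp [List.foldl_cons, pvStepA, he, pvSplitStars, pvInterleave, pvStepA_none]
      | some e =>
        simp only [List.foldl_cons, pvStepA, he, if_true]
        rw [ih (cpt + 1) (flag ++ [e])]
        simp only [pvSplitStars, pvInterleave, he, if_true]
        cases pvInterleave enc (cpt + 1) (pvSplitStars cs).2 with
        | none => rfl
        | some r =>
          simp only [Option.map_some]
          refine congrArg some (Prod.ext ?_ ?_)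
          · simp; omega
          · simp
    · simp only [List.foldl_cons, pvStepA, if_neg hs]
      rw [ih cpt (flag ++ [c])]
      simp [pvSplitStars, hs]

-- ===== VERDICT (by name: the statement is the Claim_ definition above) =====
theorem flag_back_spec : Claim_equal_flag_back := by
  intro enc chars _ _
  unfold Spec_flag_back flag_back flag_back_alt
  simp only [pvFilter_loop, List.nil_append, pvSplitFold]
  cases pvInterleave enc.toList 0 (pvSplitStars (chars.toList.filter (fun c => !pvForbidden.contains c))).2 with
  | none => rfl
  | some r => rfl
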